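-- pv_equiv track=rewrite | github.com/ThomasZumsteg/adventofcode2015 | day08.py | escape
-- ===== SOURCE A (Python) =====
-- def escape(line):
--     result = ['"']
--     escape_me = r"\"'\\"
--     for char in line:
--         if char in escape_me:
--             result.append('\\')
--         result.append(char)
--     return ''.join(result) + '"'
-- ===== SOURCE B (Python) =====
-- def escape(line):
--     # Three staged whole-string passes: escape backslashes first, then quotes, then apostrophes.
--     body = line.replace('\\', '\\\\').replace('"', '\\"').replace("'", "\\'")
--     return '"' + body + '"'
-- ===== Notes on version B (the rewrite author's own statement) =====
-- stated objective: idiomatic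
-- what changed: Replaces A's single per-character loop with membership test and list accumulator by three staged whole-string str.replace passes (backslashes first, then double quotes, then apostrophes) plus quote wrapping; the passes do not interfere because later passes never target the backslashes inserted earlier.
import Mathlib
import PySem

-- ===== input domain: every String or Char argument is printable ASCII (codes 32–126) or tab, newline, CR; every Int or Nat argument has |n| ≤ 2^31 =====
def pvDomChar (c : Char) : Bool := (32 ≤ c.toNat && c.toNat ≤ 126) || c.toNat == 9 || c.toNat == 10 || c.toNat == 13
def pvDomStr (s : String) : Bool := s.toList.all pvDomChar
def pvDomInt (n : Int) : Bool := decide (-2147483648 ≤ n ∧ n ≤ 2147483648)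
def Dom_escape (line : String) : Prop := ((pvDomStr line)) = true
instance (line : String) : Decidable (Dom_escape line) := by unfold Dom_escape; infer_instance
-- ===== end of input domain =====

-- B replaces A's single per-character loop by three staged whole-string replace passes
-- (backslash, then double quote, then apostrophe) wrapped in quotes (objective: idiomatic).

-- ===== PORT A =====
-- A: result = ['"']; for char in line: if char in "\"'\\": result.append('\\'); result.append(char);
--    return ''.join(result) + '"'
def escape (line : String) : String :=
  let escape_me : List Char := ['\\', '"', '\'', '\\', '\\']
  let result : List String :=
    line.toList.foldl (fun result char =>
      (if char ∈ escape_me then result ++ ["\\"] else result) ++ [char.toString]) ["\""]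
  String.join result ++ "\""

-- ===== PORT B =====
-- B: line.replace('\\','\\\\').replace('"','\\"').replace("'","\\'"), wrapped in quotes.
def escape_alt (line : String) : String :=
  let body :=
    PySem.Str.replace (PySem.Str.replace (PySem.Str.replace line "\\" "\\\\") "\"" "\\\"") "'" "\\'"
  "\"" ++ body ++ "\""

-- ===== PRECONDITION & SPEC =====
def Spec_escape (line : String) (out : String) : Prop := out = escape_alt line
instance (line : String) (out : String) : Decidable (Spec_escape line out) := by unfold Spec_escape; infer_instance

-- ===== CLAIM (what is proved, stated in full; the proofs are below) =====
def Claim_equal_escape : Prop := ∀ (line : String), Dom_escape line → Spec_escape line (escape line)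

-- ===== LEMMAS AND PROOFS =====

-- replacing a single-character pattern is a flatMap
theorem replace_go_single (o : Char) (new : List Char) (l : List Char) (acc : List Char)
    (fuel : Nat) (h : l.length ≤ fuel) :
    PySem.Chars.replace.go [o] new fuel l acc
      = acc.reverse ++ l.flatMap (fun c => if c = o then new else [c]) := by
  induction l generalizing fuel acc with
  | nil => cases fuel <;> simp [PySem.Chars.replace.go]
  | cons c t ih =>
    cases fuel with
    | zero => simp at h
    | succ fuel =>
      simp only [List.length_cons, Nat.succ_le_succ_iff] at h
      by_cases hc : c = o
      · subst hc
        have hpre : List.isPrefixOf [c] (c :: t) = true := by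
          simp [List.isPrefixOf]
        simp [PySem.Chars.replace.go, hpre, ih _ _ h]
      · have hpre : List.isPrefixOf [o] (c :: t) = false := by
          simp [List.isPrefixOf]
          exact fun h' => hc h'.symm
        simp [PySem.Chars.replace.go, hpre, ih _ _ h, hc]

theorem replace_single (s : List Char) (o : Char) (new : List Char) :
    PySem.Chars.replace s [o] new = s.flatMap (fun c => if c = o then new else [c]) := by
  simp [PySem.Chars.replace, replace_go_single o new s [] s.length (le_refl _)]

-- A's loop produces the quote, the flatMap of the per-char escaping, and the closing quote
theorem escape_loop (l : List Char) (acc : List String) :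
    (String.join
      (l.foldl (fun result char =>
        (if char ∈ (['\\', '"', '\'', '\\', '\\'] : List Char) then result ++ ["\\"] else result)
          ++ [char.toString]) acc)).toList
    = (String.join acc).toList
        ++ l.flatMap (fun c =>
             (if c ∈ (['\\', '"', '\'', '\\', '\\'] : List Char) then ['\\'] else []) ++ [c]) := by
  induction l generalizing acc with
  | nil => simp
  | cons c rest ih =>
    simp only [List.foldl_cons, List.flatMap_cons, ih]
    by_cases hc : c ∈ (['\\', '"', '\'', '\\', '\\'] : List Char)
    · fin_cases hc <;> simp [String.toList_join, Char.toString]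
    · simp [hc, String.toList_join, Char.toString]

-- the per-character escaping of A equals the composition of the three staged replacements
theorem flat_eq (l : List Char) :
    l.flatMap (fun c =>
        (if c ∈ (['\\', '"', '\'', '\\', '\\'] : List Char) then ['\\'] else []) ++ [c])
      = l.flatMap (fun x =>
          List.flatMap (fun y =>
              List.flatMap (fun c => if c = '\'' then ['\\', '\''] else [c])
                (if y = '"' then ['\\', '"'] else [y]))
            (if x = '\\' then ['\\', '\\'] else [x])) := by
  apply List.flatMap_congr
  intro c _
  by_cases hc : c ∈ (['\\', '"', '\'', '\\', '\\'] : List Char)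
  · fin_cases hc <;> simp
  · simp only [List.mem_cons, not_or] at hc
    simp [hc.1, hc.2.1, hc.2.2.1]

-- ===== VERDICT (by name: the statement is the Claim_ definition above) =====
theorem escape_spec : Claim_equal_escape := by
  intro line _
  show _ = _
  apply String.toList_inj.mp
  simp only [escape, escape_alt]
  rw [String.toList_append, escape_loop]
  simp only [String.toList_append, PySem.Str.toList_replace]
  have h1 : ("\\" : String).toList = ['\\'] := rfl
  have h2 : ("\\\\" : String).toList = ['\\', '\\'] := rfl
  have h3 : ("\"" : String).toList = ['"'] := rfl
  have h4 : ("\\\"" : String).toList = ['\\', '"'] := rfl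
  have h5 : ("'" : String).toList = ['\''] := rfl
  have h6 : ("\\'" : String).toList = ['\\', '\''] := rfl
  rw [h1, h2, h3, h4, h5, h6,
    replace_single, replace_single, replace_single, List.flatMap_assoc, List.flatMap_assoc]
  have hj : (String.join ["\""]).toList = ['"'] := by decide
  rw [hj, flat_eq]
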